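-- pv_equiv track=rewrite | github.com/Yagnesh-Gohil-100/Kernversion-Backend | generators.py | generate_transition
-- ===== SOURCE A (Python) =====
-- def generate_transition(kern_output, from_vibhaag, to_vibhaag):
--     # count number of divisions passed in last beat cycle, next taali will be at this count index
--     count_division = 0
--
--     for i in reversed(range(len(kern_output))):
--         if kern_output[i].startswith('\n=='):
--             break
--         elif kern_output[i] == '\n=\n':
--             count_division += 1
--
--     # get index of sam in from vibhaag
--     from_sam_index = -1
--     for i in range(len(from_vibhaag)):
--         if from_vibhaag[i] == 'X':
--             from_sam_index = i
--             break
--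
--     # get index of sam in to vibhaag
--     to_sam_index = -1
--     for i in range(len(to_vibhaag)):
--         if to_vibhaag[i] == 'X':
--             to_sam_index = i
--             break
--
--     i = 0
--     x = ((from_sam_index + i) % len(from_vibhaag))
--
--     while ((from_sam_index + i) % len(from_vibhaag)) != count_division:
--         i += 1
--
--     # find next taali index in to vibhaag
--     next_taali_index = ((to_sam_index + i) % len(from_vibhaag))
--
--     # starting from index as per count_division, number of divisions to repeat
--     count_repeat_division = (len(from_vibhaag) - next_taali_index) % len(from_vibhaag)
--
--     count = -1
--     i = 0
--     while count < count_division: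
--         item = kern_output[i]
--         if item.startswith('\n==') or item == ('\n=\n'):
--             count += 1
--         i += 1
--
--
--     # transition output starts from index i
--     transition_kern = []
--
--     count = 0
--     while count < count_repeat_division:
--         item = kern_output[i]
--         if item.startswith('\n==') or item == ('\n=\n'):
--             count += 1
--             item = '\n=\n'
--
--         transition_kern.append(item)
--         i += 1
--
--     # Join and clean up newlines
--     kern_str = ''.join(transition_kern)
--     kern_str = kern_str.replace('\n\n', '\n')  # Remove duplicate newlines
--     return kern_str.strip(), transition_kern
-- ===== SOURCE B (Python) =====
-- def generate_transition(kern_output, from_vibhaag, to_vibhaag):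
--     # count '\n=\n' items after the last '\n==' section marker (whole list if none)
--     last_section = -1
--     for j, s in enumerate(kern_output):
--         if s.startswith('\n=='):
--             last_section = j
--     count_division = kern_output[last_section + 1:].count('\n=\n')
--
--     from_sam_index = next((j for j, s in enumerate(from_vibhaag) if s == 'X'), -1)
--     to_sam_index = next((j for j, s in enumerate(to_vibhaag) if s == 'X'), -1)
--
--     n = len(from_vibhaag)
--     # closed form for the modular search: smallest i with (from_sam_index+i) % n == count_division
--     steps = (count_division - from_sam_index) % n
--     count_repeat_division = (n - (to_sam_index + steps) % n) % n
--
--     # indices of all division markers, built in one scan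
--     marks = [j for j, s in enumerate(kern_output)
--              if s.startswith('\n==') or s == '\n=\n']
--
--     start = marks[count_division] + 1
--     if count_repeat_division == 0:
--         transition_kern = []
--     else:
--         end = marks[count_division + count_repeat_division]
--         transition_kern = ['\n=\n' if (s.startswith('\n==') or s == '\n=\n') else s
--                            for s in kern_output[start:end + 1]]
--
--     kern_str = ''.join(transition_kern).replace('\n\n', '\n')
--     return kern_str.strip(), transition_kern
-- ===== Notes on version B (the rewrite author's own statement) =====
-- stated objective: alternative
-- what changed: B replaces A's four index-chasing while-loops by one enumerate scan that builds a marks index list, a closed modular formula ((count_division - from_sam_index) % n) in place of the linear while-search, and slice-based segment extraction from the marks table.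
import Mathlib
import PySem

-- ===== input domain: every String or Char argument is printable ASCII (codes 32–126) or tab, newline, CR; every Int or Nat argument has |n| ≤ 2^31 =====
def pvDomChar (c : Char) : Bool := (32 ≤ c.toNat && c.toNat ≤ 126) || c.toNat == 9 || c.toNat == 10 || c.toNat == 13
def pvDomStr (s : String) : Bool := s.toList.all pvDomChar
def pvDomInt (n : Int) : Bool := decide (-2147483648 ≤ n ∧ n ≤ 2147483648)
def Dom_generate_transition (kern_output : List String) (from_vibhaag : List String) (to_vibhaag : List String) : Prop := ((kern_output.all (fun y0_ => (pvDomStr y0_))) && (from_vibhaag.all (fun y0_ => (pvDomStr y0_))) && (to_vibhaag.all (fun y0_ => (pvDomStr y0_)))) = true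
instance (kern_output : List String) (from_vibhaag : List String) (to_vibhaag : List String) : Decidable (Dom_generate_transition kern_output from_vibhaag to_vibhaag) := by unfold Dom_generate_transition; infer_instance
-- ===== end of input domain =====

-- B replaces A's four index-chasing while-loops by: a single marks-index list built in one scan,
-- a closed modular formula for the taali search, and slice-based segment extraction (alternative decomposition, same cost).


-- shared one-line predicate: "item.startswith('\n==') or item == '\n=\n'"
def pvMark (s : String) : Bool := PySem.Str.startswith s "\n==" || s == "\n=\n"

-- ===== PORT A =====
-- reversed(range(len(kern_output))) loop with break / count
def pvA_revCount : List String → Int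
  | [] => 0
  | s :: r =>
    if PySem.Str.startswith s "\n==" then 0
    else if s == "\n=\n" then pvA_revCount r + 1
    else pvA_revCount r

-- 'for i in range(len(v)): if v[i] == "X": idx = i; break' with default -1
def pvA_samIdx : List String → Int → Int
  | [], _ => -1
  | s :: r, j => if s == "X" then j else pvA_samIdx r (j + 1)

-- 'while (fsam + i) % n != target: i += 1'  (fuel makes the loop total; inside Pre_ the fuel is never exhausted)
def pvA_search (n target fsam : Int) : Nat → Int → Int
  | 0, i => i
  | fuel + 1, i =>
    if PySem.Int.mod (fsam + i) n == target then i
    else pvA_search n target fsam fuel (i + 1)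

-- 'count = -1; i = 0; while count < count_division: item = kern_output[i]; …; i += 1'  (none = IndexError)
def pvA_skip : List String → Int → Int → Option (List String)
  | l, c, t =>
    if c < t then
      match l with
      | [] => none
      | s :: r => pvA_skip r (if pvMark s then c + 1 else c) t
    else some l

-- 'count = 0; while count < count_repeat_division: …; transition_kern.append(item); i += 1'  (none = IndexError)
def pvA_collect : List String → Int → Int → List String → Option (List String)
  | l, c, t, acc =>
    if c < t then
      match l with
      | [] => none
      | s :: r =>
        if pvMark s then pvA_collect r (c + 1) t (acc ++ ["\n=\n"])
        else pvA_collect r c t (acc ++ [s])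
    else some acc

def generate_transition (kern_output : List String) (from_vibhaag : List String) (to_vibhaag : List String) : String × List String :=
  let count_division := pvA_revCount kern_output.reverse
  let from_sam_index := pvA_samIdx from_vibhaag 0
  let to_sam_index := pvA_samIdx to_vibhaag 0
  let n : Int := from_vibhaag.length
  let i := pvA_search n count_division from_sam_index from_vibhaag.length 0
  let next_taali_index := PySem.Int.mod (to_sam_index + i) n
  let count_repeat_division := PySem.Int.mod (n - next_taali_index) n
  match pvA_skip kern_output (-1) count_division with
  | none => ("", [])   -- IndexError (outside Pre_)
  | some rest =>
    match pvA_collect rest 0 count_repeat_division [] with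
    | none => ("", [])  -- IndexError (outside Pre_)
    | some transition_kern =>
      (PySem.Str.strip (PySem.Str.replace (PySem.Str.join "" transition_kern) "\n\n" "\n"), transition_kern)

-- ===== PORT B =====
def generate_transition_alt (kern_output : List String) (from_vibhaag : List String) (to_vibhaag : List String) : String × List String :=
  let last_section := (PySem.List.enumerate kern_output 0).foldl
      (fun acc p => if PySem.Str.startswith p.2 "\n==" then p.1 else acc) (-1)
  let count_division : Int :=
    ((PySem.List.slice kern_output (some (last_section + 1)) none).count "\n=\n" : Int)
  let from_sam_index :=
    match (PySem.List.enumerate from_vibhaag 0).find? (fun p => p.2 == "X") with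
    | some p => p.1 | none => -1
  let to_sam_index :=
    match (PySem.List.enumerate to_vibhaag 0).find? (fun p => p.2 == "X") with
    | some p => p.1 | none => -1
  let n : Int := from_vibhaag.length
  let steps := PySem.Int.mod (count_division - from_sam_index) n
  let count_repeat_division := PySem.Int.mod (n - PySem.Int.mod (to_sam_index + steps) n) n
  let marks : List Int := ((PySem.List.enumerate kern_output 0).filter (fun p => pvMark p.2)).map (·.1)
  match PySem.List.pyGet? marks count_division with
  | none => ("", [])   -- IndexError (outside Pre_)
  | some m =>
    let tkOpt : Option (List String) :=
      if count_repeat_division == 0 then some []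
      else
        match PySem.List.pyGet? marks (count_division + count_repeat_division) with
        | none => none   -- IndexError (outside Pre_)
        | some e => some ((PySem.List.slice kern_output (some (m + 1)) (some (e + 1))).map
                            (fun s => if pvMark s then "\n=\n" else s))
    match tkOpt with
    | none => ("", [])
    | some transition_kern =>
      (PySem.Str.strip (PySem.Str.replace (PySem.Str.join "" transition_kern) "\n\n" "\n"), transition_kern)

-- ===== PRECONDITION & SPEC =====
-- closed-form mirrors of the derived quantities, used only to state Pre_
def pvPreCd (ko : List String) : Nat :=
  (ko.reverse.takeWhile (fun s => !(PySem.Str.startswith s "\n=="))).count "\n=\n"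
def pvPreSam (l : List String) : Int :=
  match l.findIdx? (· == "X") with | some k => (k : Int) | none => -1
def pvPreCrd (ko fv tv : List String) : Int :=
  let n : Int := fv.length
  PySem.Int.mod (n - PySem.Int.mod (pvPreSam tv + PySem.Int.mod ((pvPreCd ko : Int) - pvPreSam fv) n) n) n

-- Pre_ = exactly where the Python A returns: a non-empty from_vibhaag whose length exceeds the
-- division count (else ZeroDivisionError / an infinite while loop) and enough division markers
-- in kern_output for both index scans (else IndexError).
def Pre_generate_transition (kern_output : List String) (from_vibhaag : List String) (to_vibhaag : List String) : Prop :=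
  0 < from_vibhaag.length ∧
  (pvPreCd kern_output : Int) < (from_vibhaag.length : Int) ∧
  (pvPreCd kern_output : Int) + pvPreCrd kern_output from_vibhaag to_vibhaag + 1
    ≤ (kern_output.countP pvMark : Int)
instance (kern_output : List String) (from_vibhaag : List String) (to_vibhaag : List String) : Decidable (Pre_generate_transition kern_output from_vibhaag to_vibhaag) := by unfold Pre_generate_transition; infer_instance

def pvWitness_generate_transition : List String × List String × List String :=
  (["\n==1\n"], ["X"], ["X"])

def Spec_generate_transition (kern_output : List String) (from_vibhaag : List String) (to_vibhaag : List String) (out : String × List String) : Prop := out = generate_transition_alt kern_output from_vibhaag to_vibhaag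
instance (kern_output : List String) (from_vibhaag : List String) (to_vibhaag : List String) (out : String × List String) : Decidable (Spec_generate_transition kern_output from_vibhaag to_vibhaag out) := by unfold Spec_generate_transition; infer_instance

-- ===== CLAIM (what is proved, stated in full; the proofs are below) =====
def Claim_equal_generate_transition : Prop := ∀ (kern_output : List String) (from_vibhaag : List String) (to_vibhaag : List String), Dom_generate_transition kern_output from_vibhaag to_vibhaag → Pre_generate_transition kern_output from_vibhaag to_vibhaag → Spec_generate_transition kern_output from_vibhaag to_vibhaag (generate_transition kern_output from_vibhaag to_vibhaag)

-- ===== LEMMAS AND PROOFS =====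

-- Nat-level marker-index list, the proof-side skeleton of both programs
def pvMarksRec : List String → Nat → List Nat
  | [], _ => []
  | s :: r, j => if pvMark s then j :: pvMarksRec r (j + 1) else pvMarksRec r (j + 1)

def pvLastIdx (l : List String) : Int :=
  (PySem.List.enumerate l 0).foldl (fun acc p => if PySem.Str.startswith p.2 "\n==" then p.1 else acc) (-1)

theorem pvMarksRec_shift (l : List String) (j : Nat) :
    pvMarksRec l j = (pvMarksRec l 0).map (· + j) := by
  induction l generalizing j with
  | nil => simp [pvMarksRec]
  | cons s r ih =>
    by_cases h : pvMark s <;>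
      simp [pvMarksRec, h, ih (j+1), ih 1, List.map_map, Function.comp_def, Nat.add_assoc] <;>
      (intro a _; omega)

theorem pvMarksRec_length (l : List String) : (pvMarksRec l 0).length = l.countP pvMark := by
  induction l with
  | nil => simp [pvMarksRec]
  | cons s r ih =>
    by_cases h : pvMark s <;>
      simp [pvMarksRec, h, pvMarksRec_shift r 1, ih]

theorem pvMarksRec_lt (l : List String) : ∀ m ∈ pvMarksRec l 0, m < l.length := by
  induction l with
  | nil => simp [pvMarksRec]
  | cons s r ih =>
    intro m hm
    rw [pvMarksRec, pvMarksRec_shift r 1] at hm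
    by_cases h : pvMark s <;> simp [h] at hm
    · rcases hm with rfl | ⟨a, ha, rfl⟩
      · simp
      · have := ih a ha; simp; omega
    · obtain ⟨a, ha, rfl⟩ := hm; have := ih a ha; simp; omega

theorem pvMarksRec_sorted (l : List String) : (pvMarksRec l 0).Pairwise (· < ·) := by
  induction l with
  | nil => simp [pvMarksRec]
  | cons s r ih =>
    by_cases h : pvMark s
    · rw [pvMarksRec, if_pos h, pvMarksRec_shift r 1]
      refine List.Pairwise.cons ?_ ((List.pairwise_map).2 (ih.imp (fun hxy => by omega)))
      intro a ha
      obtain ⟨x, _, rfl⟩ := List.mem_map.1 ha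
      omega
    · rw [pvMarksRec, if_neg h, pvMarksRec_shift r 1]
      exact (List.pairwise_map).2 (ih.imp (fun hxy => by omega))

theorem pvMarksRec_append (l1 l2 : List String) :
    pvMarksRec (l1 ++ l2) 0 = pvMarksRec l1 0 ++ (pvMarksRec l2 0).map (· + l1.length) := by
  induction l1 with
  | nil => simp [pvMarksRec]
  | cons s r ih =>
    by_cases h : pvMark s <;>
      simp [pvMarksRec, h, pvMarksRec_shift (r ++ l2) 1, ih, pvMarksRec_shift r 1,
        List.map_map, Function.comp_def, Nat.add_assoc]

theorem pvMarks_enum_gen (l : List String) (s : Int) :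
    ((PySem.List.enumerate l s).filter (fun p => pvMark p.2)).map (·.1)
      = (pvMarksRec l 0).map (fun k : Nat => s + (k : Int)) := by
  induction l generalizing s with
  | nil => simp [pvMarksRec, PySem.List.enumerate_nil]
  | cons x r ih =>
    rw [PySem.List.enumerate_cons, pvMarksRec]
    by_cases h : pvMark x
    · rw [if_pos h, List.filter_cons_of_pos (by simpa using h), List.map_cons, ih (s+1),
        pvMarksRec_shift r 1, List.map_cons, List.map_map]
      refine congrArg₂ _ (by simp) (List.map_congr_left (fun a _ => ?_))
      simp; push_cast; ring
    · rw [if_neg h, List.filter_cons_of_neg (by simpa using h), ih (s+1),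
        pvMarksRec_shift r 1, List.map_map]
      refine List.map_congr_left (fun a _ => ?_)
      simp; push_cast; ring

theorem pvA_revCount_gen (l : List String) :
    pvA_revCount l = ((l.takeWhile (fun s => !(PySem.Str.startswith s "\n=="))).count "\n=\n" : Int) := by
  induction l with
  | nil => simp [pvA_revCount]
  | cons x r ih =>
    simp only [pvA_revCount]
    by_cases h : PySem.Str.startswith x "\n=="
    · rw [if_pos h, List.takeWhile_cons_of_neg (by simpa using h)]
      by_cases h2 : x = "\n=\n"
      · exact absurd (h2 ▸ h) (by decide)
      · simp
    · rw [if_neg h, List.takeWhile_cons_of_pos (by simpa using h), List.count_cons, ih]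
      by_cases h2 : x = "\n=\n"
      · subst h2; simp
      · simp [h2]

theorem pvA_samIdx_gen (l : List String) (j : Int) :
    pvA_samIdx l j = (match l.findIdx? (· == "X") with | some k => j + (k : Int) | none => -1) := by
  induction l generalizing j with
  | nil => simp [pvA_samIdx]
  | cons x r ih =>
    by_cases h : x == "X" <;>
      simp [pvA_samIdx, h, List.findIdx?_cons, ih (j+1)] <;>
      cases hr : r.findIdx? (· == "X") <;> simp <;> push_cast <;> ring

theorem pvB_sam_gen (l : List String) (s : Int) :
    (PySem.List.enumerate l s).find? (fun p => p.2 == "X")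
      = (l.findIdx? (· == "X")).map (fun k : Nat => ((s + (k : Int)), "X")) := by
  induction l generalizing s with
  | nil => simp [PySem.List.enumerate_nil]
  | cons x r ih =>
    rw [PySem.List.enumerate_cons]
    by_cases h : x == "X"
    · simp_all [List.find?_cons, List.findIdx?_cons]
    · simp [List.find?_cons_of_neg, h, List.findIdx?_cons, ih (s+1)]
      cases hr : r.findIdx? (· == "X") <;> simp <;> push_cast <;> ring

theorem pvA_search_steps (n target fsam : Int) :
    ∀ (d fuel : Nat) (i : Int), d ≤ fuel →
      (∀ j : Nat, j < d → PySem.Int.mod (fsam + (i + j)) n ≠ target) →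
      PySem.Int.mod (fsam + (i + d)) n = target →
      pvA_search n target fsam fuel i = i + d := by
  intro d
  induction d with
  | zero =>
    intro fuel i _ _ hd
    cases fuel with
    | zero => simp [pvA_search]
    | succ f => simp only [pvA_search]; rw [if_pos (by simpa using hd)]; simp
  | succ d ih =>
    intro fuel i hle hmin hd
    cases fuel with
    | zero => omega
    | succ f =>
      simp only [pvA_search]
      rw [if_neg (by simpa using hmin 0 (by omega))]
      rw [ih f (i + 1) (by omega)
        (fun j hj => by have := hmin (j + 1) (by omega); push_cast at this ⊢; ring_nf at this ⊢; exact this)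
        (by push_cast at hd ⊢; ring_nf at hd ⊢; exact hd)]
      push_cast; ring

theorem pvA_search_eq (n target fsam : Int) (hn : 0 < n) (ht0 : 0 ≤ target) (ht : target < n)
    (fuel : Nat) (hfuel : n ≤ (fuel : Int)) :
    pvA_search n target fsam fuel 0 = PySem.Int.mod (target - fsam) n := by
  have hm := PySem.Int.mod_nonneg (target - fsam) hn
  have hl := PySem.Int.mod_lt (target - fsam) hn
  set d : Int := PySem.Int.mod (target - fsam) n with hdd
  have hemod : d = (target - fsam) % n := by rw [hdd, PySem.Int.mod_eq_emod_of_pos hn]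
  have key : ∀ x : Int, x % n = d % n → PySem.Int.mod (fsam + x) n = target := by
    intro x hx
    rw [PySem.Int.mod_eq_emod_of_pos hn]
    have : (fsam + x) % n = (fsam + d) % n := by
      rw [Int.add_emod, hx, ← Int.add_emod]
    rw [this, hemod, Int.add_emod, Int.emod_emod_of_dvd _ dvd_rfl, ← Int.add_emod]
    have : fsam + (target - fsam) = target := by ring
    rw [this, Int.emod_eq_of_lt ht0 ht]
  have hd0 : PySem.Int.mod (fsam + (0 + d)) n = target := by
    apply key; rw [hemod, Int.zero_add, Int.emod_emod_of_dvd _ dvd_rfl]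
  have hmin : ∀ j : Nat, (j : Int) < d → PySem.Int.mod (fsam + (0 + (j : Int))) n ≠ target := by
    intro j hj hcon
    rw [PySem.Int.mod_eq_emod_of_pos hn] at hcon
    -- (fsam + j) % n = target and (fsam + d) % n = target force n ∣ (d - j), impossible for 0 ≤ j < d < n
    have h2 : (fsam + (0 + d)) % n = target := by
      rw [← PySem.Int.mod_eq_emod_of_pos hn]; exact hd0
    have hdvd : n ∣ (d - (j : Int)) := by
      have : (fsam + (0 + d)) % n = (fsam + (0 + (j:Int))) % n := by rw [h2, hcon]
      have h3 : ((fsam + (0 + d)) - (fsam + (0 + (j:Int)))) % n = 0 := by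
        rw [Int.sub_emod, this, sub_self, Int.zero_emod]
      have h4 : (fsam + (0 + d)) - (fsam + (0 + (j:Int))) = d - j := by ring
      rw [h4] at h3
      exact Int.dvd_of_emod_eq_zero h3
    have hpos : 0 < d - (j : Int) := by omega
    have := Int.le_of_dvd hpos hdvd
    omega
  have hcast : ((d.toNat : Nat) : Int) = d := Int.toNat_of_nonneg hm
  rw [pvA_search_steps n target fsam d.toNat fuel 0 (by omega)
    (fun j hj => hmin j (by omega)) (by rw [hcast]; exact hd0)]
  omega

theorem pvA_skip_stop (l : List String) (c t : Int) (h : ¬ c < t) : pvA_skip l c t = some l := by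
  cases l <;> rw [pvA_skip, if_neg h]

theorem pvA_collect_stop (l : List String) (c t : Int) (acc : List String) (h : ¬ c < t) :
    pvA_collect l c t acc = some acc := by
  cases l <;> rw [pvA_collect, if_neg h]

theorem pvA_skip_eq (l : List String) : ∀ (c t : Int), c < t →
    pvA_skip l c t = ((pvMarksRec l 0)[(t - c - 1).toNat]?).map (fun m => l.drop (m + 1)) := by
  induction l with
  | nil => intro c t h; rw [pvA_skip, if_pos h]; simp [pvMarksRec]
  | cons s r ih =>
    intro c t h
    rw [pvA_skip, if_pos h]
    by_cases hm : pvMark s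
    · rw [if_pos hm, pvMarksRec, if_pos hm, pvMarksRec_shift r 1]
      by_cases h2 : c + 1 < t
      · rw [ih (c + 1) t h2]
        have hk : (t - c - 1).toNat = (t - (c+1) - 1).toNat + 1 := by omega
        rw [hk]
        simp [List.getElem?_map, Option.map_map, Function.comp_def]
      · have ht : t = c + 1 := by omega
        rw [pvA_skip_stop r (c+1) t (by omega)]
        have hk : (t - c - 1).toNat = 0 := by omega
        rw [hk]
        simp
    · rw [if_neg hm, pvMarksRec, if_neg hm, pvMarksRec_shift r 1, ih c t h]
      simp [List.getElem?_map, Option.map_map, Function.comp_def]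

theorem pvA_collect_eq (l : List String) : ∀ (c t : Int) (acc : List String), c < t →
    pvA_collect l c t acc = ((pvMarksRec l 0)[(t - c - 1).toNat]?).map
      (fun e => acc ++ (l.take (e + 1)).map (fun s => if pvMark s then "\n=\n" else s)) := by
  induction l with
  | nil => intro c t acc h; rw [pvA_collect, if_pos h]; simp [pvMarksRec]
  | cons s r ih =>
    intro c t acc h
    rw [pvA_collect, if_pos h]
    by_cases hm : pvMark s
    · rw [if_pos hm, pvMarksRec, if_pos hm, pvMarksRec_shift r 1]
      by_cases h2 : c + 1 < t
      · rw [ih (c + 1) t (acc ++ ["\n=\n"]) h2]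
        have hk : (t - c - 1).toNat = (t - (c+1) - 1).toNat + 1 := by omega
        rw [hk]
        simp [List.getElem?_map, Option.map_map, Function.comp_def, hm]
      · have ht : t = c + 1 := by omega
        rw [pvA_collect_stop r (c+1) t (acc ++ ["\n=\n"]) (by omega)]
        have hk : (t - c - 1).toNat = 0 := by omega
        rw [hk]
        simp [hm]
    · rw [if_neg hm, pvMarksRec, if_neg hm, pvMarksRec_shift r 1, ih c t (acc ++ [s]) h]
      simp [List.getElem?_map, Option.map_map, Function.comp_def, hm]

theorem pvLastIdx_bounds (l : List String) : -1 ≤ pvLastIdx l ∧ pvLastIdx l < l.length := by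
  induction l using List.reverseRecOn with
  | nil => simp [pvLastIdx, PySem.List.enumerate_nil]
  | append_singleton l a ih =>
    unfold pvLastIdx at ih ⊢
    rw [PySem.List.enumerate_append, List.foldl_append]
    simp only [PySem.List.enumerate_cons, PySem.List.enumerate_nil, List.foldl_cons, List.foldl_nil,
      List.length_append]
    by_cases h : PySem.Str.startswith a "\n=="
    · simp only [if_pos h, List.length_singleton]; omega
    · simp only [if_neg h, List.length_singleton]; omega

theorem pvB_cd_eq (l : List String) :
    ((PySem.List.slice l (some (pvLastIdx l + 1)) none).count "\n=\n" : Int) = (pvPreCd l : Int) := by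
  induction l using List.reverseRecOn with
  | nil => simp [pvLastIdx, pvPreCd, PySem.List.enumerate_nil, PySem.List.slice]
  | append_singleton l a ih =>
    have hb := pvLastIdx_bounds l
    have hstep : pvLastIdx (l ++ [a])
        = if PySem.Str.startswith a "\n==" then ((0 : Int) + (l.length : Int)) else pvLastIdx l := by
      unfold pvLastIdx
      rw [PySem.List.enumerate_append, List.foldl_append]
      simp only [PySem.List.enumerate_cons, PySem.List.enumerate_nil, List.foldl_cons, List.foldl_nil]
    rw [show PySem.List.slice (l ++ [a]) (some (pvLastIdx (l ++ [a]) + 1)) none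
        = (l ++ [a]).drop (pvLastIdx (l ++ [a]) + 1).toNat from
        PySem.List.slice_from _ (by rw [hstep]; split <;> push_cast <;> omega)]
    rw [show PySem.List.slice l (some (pvLastIdx l + 1)) none
        = l.drop (pvLastIdx l + 1).toNat from PySem.List.slice_from _ (by omega)] at ih
    by_cases h : PySem.Str.startswith a "\n=="
    · rw [hstep, if_pos h]
      have hdrop : (l ++ [a]).drop (((0:Int) + (l.length : Int)) + 1).toNat = [] := by
        apply List.drop_eq_nil_of_le; simp
      rw [hdrop]
      unfold pvPreCd
      rw [List.reverse_append, List.reverse_singleton, List.singleton_append,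
        List.takeWhile_cons_of_neg (by simpa using h)]
    · rw [hstep, if_neg h]
      have hle : (pvLastIdx l + 1).toNat ≤ l.length := by omega
      rw [List.drop_append_of_le_length hle, List.count_append]
      unfold pvPreCd
      rw [List.reverse_append, List.reverse_singleton, List.singleton_append,
        List.takeWhile_cons_of_pos (p := fun s => !(PySem.Str.startswith s "\n==")) (by simpa using h),
        List.count_cons]
      push_cast
      rw [ih]
      by_cases h2 : a = "\n=\n"
      · simp [h2, pvPreCd]
      · simp [h2, Ne.symm h2, pvPreCd]

theorem pvMarks_split (ko : List String) (k m : Nat)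
    (hm : (pvMarksRec ko 0)[k]? = some m) :
    pvMarksRec ko 0 = pvMarksRec (ko.take (m+1)) 0
        ++ (pvMarksRec (ko.drop (m+1)) 0).map (· + (m+1))
      ∧ (pvMarksRec (ko.take (m+1)) 0).length = k + 1 := by
  have hmem : m ∈ pvMarksRec ko 0 := List.mem_of_getElem? hm
  have hlt : m < ko.length := pvMarksRec_lt ko m hmem
  have htl : (ko.take (m+1)).length = m + 1 := by simp; omega
  have happ : pvMarksRec ko 0 = pvMarksRec (ko.take (m+1)) 0
      ++ (pvMarksRec (ko.drop (m+1)) 0).map (· + (m+1)) := by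
    conv_lhs => rw [← List.take_append_drop (m+1) ko]
    rw [pvMarksRec_append, htl]
  refine ⟨happ, ?_⟩
  set A' := pvMarksRec (ko.take (m+1)) 0 with hA
  have hAlt : ∀ x ∈ A', x < m + 1 := by
    intro x hx; have := pvMarksRec_lt _ x hx; omega
  have hklt : k < A'.length := by
    by_contra hk
    rw [happ, List.getElem?_append_right (by omega)] at hm
    have : m ∈ (pvMarksRec (ko.drop (m+1)) 0).map (· + (m+1)) := List.mem_of_getElem? hm
    obtain ⟨x, _, hx⟩ := List.mem_map.1 this
    omega
  have hAk : A'[k] = m := by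
    rw [happ, List.getElem?_append_left hklt, List.getElem?_eq_getElem hklt] at hm
    exact Option.some.inj hm
  have hpw : A'.Pairwise (· < ·) := by
    have := pvMarksRec_sorted ko
    rw [happ] at this
    exact (List.pairwise_append.1 this).1
  by_contra hne
  have hlen : k + 1 < A'.length := by omega
  have := (List.pairwise_iff_getElem.1 hpw) k (k+1) hklt hlen (by omega)
  have := hAlt (A'[k+1]) (A'.getElem_mem hlen)
  omega


-- ===== VERDICT (by name: the statement is the Claim_ definition above) =====
theorem generate_transition_spec : Claim_equal_generate_transition := by
  intro ko fv tv _hdom hpre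
  obtain ⟨hn, hcd, hmk⟩ := hpre
  unfold Spec_generate_transition
  have hn' : (0:Int) < (fv.length : Int) := by exact_mod_cast hn
  have hA_f : pvA_samIdx fv 0 = pvPreSam fv := by
    rw [pvA_samIdx_gen]; unfold pvPreSam; cases fv.findIdx? (· == "X") <;> simp
  have hA_t : pvA_samIdx tv 0 = pvPreSam tv := by
    rw [pvA_samIdx_gen]; unfold pvPreSam; cases tv.findIdx? (· == "X") <;> simp
  have hB_f : (match (PySem.List.enumerate fv 0).find? (fun p => p.2 == "X") with
      | some p => p.1 | none => (-1 : Int)) = pvPreSam fv := by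
    rw [pvB_sam_gen]; unfold pvPreSam; cases fv.findIdx? (· == "X") <;> simp
  have hB_t : (match (PySem.List.enumerate tv 0).find? (fun p => p.2 == "X") with
      | some p => p.1 | none => (-1 : Int)) = pvPreSam tv := by
    rw [pvB_sam_gen]; unfold pvPreSam; cases tv.findIdx? (· == "X") <;> simp
  have hA_cd : pvA_revCount ko.reverse = ((pvPreCd ko : Nat) : Int) := pvA_revCount_gen ko.reverse
  have hB_cd : ((PySem.List.slice ko (some ((PySem.List.enumerate ko 0).foldl
      (fun acc p => if PySem.Str.startswith p.2 "\n==" then p.1 else acc) (-1) + 1)) none).count "\n=\n" : Int)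
      = ((pvPreCd ko : Nat) : Int) := pvB_cd_eq ko
  have hi : pvA_search (fv.length : Int) ((pvPreCd ko : Nat) : Int) (pvPreSam fv) fv.length 0
      = PySem.Int.mod (((pvPreCd ko : Nat) : Int) - pvPreSam fv) (fv.length : Int) :=
    pvA_search_eq _ _ _ hn' (by positivity) hcd fv.length (by omega)
  have hcrd_eq : PySem.Int.mod ((fv.length : Int) - PySem.Int.mod (pvPreSam tv
      + PySem.Int.mod (((pvPreCd ko : Nat) : Int) - pvPreSam fv) (fv.length : Int)) (fv.length : Int))
      (fv.length : Int) = pvPreCrd ko fv tv := rfl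
  set crd := pvPreCrd ko fv tv with hcrd_def
  have hcrd0 : 0 ≤ crd := by
    rw [hcrd_def]; unfold pvPreCrd; exact PySem.Int.mod_nonneg _ hn'
  set cdN := pvPreCd ko with hcdN
  set crdN := crd.toNat with hcrdN
  have hcrd_cast : (crdN : Int) = crd := Int.toNat_of_nonneg hcrd0
  have hmarks : ((PySem.List.enumerate ko 0).filter (fun p => pvMark p.2)).map (·.1)
      = (pvMarksRec ko 0).map (fun k : Nat => (k : Int)) := by
    rw [pvMarks_enum_gen]; exact List.map_congr_left (fun a _ => by simp)
  have hmk' : cdN + crdN + 1 ≤ (pvMarksRec ko 0).length := by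
    rw [pvMarksRec_length]; omega
  have h1 : cdN < (pvMarksRec ko 0).length := by omega
  have hidx1 : (pvMarksRec ko 0)[cdN]? = some ((pvMarksRec ko 0)[cdN]'h1) :=
    List.getElem?_eq_getElem h1
  set m := (pvMarksRec ko 0)[cdN]'h1 with hm_def
  have hskip : pvA_skip ko (-1) (cdN : Int) = some (ko.drop (m+1)) := by
    rw [pvA_skip_eq ko (-1) (cdN : Int) (by omega)]
    have hx : ((cdN : Int) - (-1) - 1).toNat = cdN := by omega
    rw [hx, hidx1, Option.map_some]
  have hget1 : PySem.List.pyGet? ((pvMarksRec ko 0).map (fun k : Nat => (k : Int))) (cdN : Int)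
      = some ((m : Nat) : Int) := by
    rw [PySem.List.pyGet?_natCast, List.getElem?_map, hidx1, Option.map_some]
  -- unfold both programs
  simp only [generate_transition, generate_transition_alt]
  rw [hA_f, hA_t, hB_f, hB_t, hA_cd, hB_cd, hi, hmarks, hget1, hskip, hcrd_eq]
  dsimp only
  by_cases hz : crd = 0
  · rw [hz]
    rw [pvA_collect_stop _ _ _ _ (by omega)]
    norm_num
  · -- crd > 0
    have hcrdN1 : 1 ≤ crdN := by omega
    have h2 : cdN + crdN < (pvMarksRec ko 0).length := by omega
    have hidx2 : (pvMarksRec ko 0)[cdN + crdN]? = some ((pvMarksRec ko 0)[cdN + crdN]'h2) :=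
      List.getElem?_eq_getElem h2
    set E := (pvMarksRec ko 0)[cdN + crdN]'h2 with hE_def
    obtain ⟨happ, hA'len⟩ := pvMarks_split ko cdN m hidx1
    have hEY : ((pvMarksRec (ko.drop (m+1)) 0).map (· + (m+1)))[crdN - 1]? = some E := by
      rw [happ, List.getElem?_append_right (by omega)] at hidx2
      rw [← hidx2]; congr 1; omega
    rw [List.getElem?_map] at hEY
    obtain ⟨e, he, heE⟩ : ∃ e, (pvMarksRec (ko.drop (m+1)) 0)[crdN - 1]? = some e ∧ e + (m+1) = E := by
      cases hY : (pvMarksRec (ko.drop (m+1)) 0)[crdN - 1]? with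
      | none => rw [hY] at hEY; simp at hEY
      | some e => rw [hY] at hEY; exact ⟨e, rfl, by simpa using hEY⟩
    have hcol : pvA_collect (ko.drop (m+1)) 0 crd []
        = some (((ko.drop (m+1)).take (e + 1)).map (fun s => if pvMark s then "\n=\n" else s)) := by
      rw [pvA_collect_eq _ 0 crd [] (by omega)]
      have hx : (crd - 0 - 1).toNat = crdN - 1 := by omega
      rw [hx, he, Option.map_some, List.nil_append]
    have hget2 : PySem.List.pyGet? ((pvMarksRec ko 0).map (fun k : Nat => (k : Int))) ((cdN : Int) + crd)
        = some ((E : Nat) : Int) := by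
      have hx : (cdN : Int) + crd = ((cdN + crdN : Nat) : Int) := by push_cast; omega
      rw [hx, PySem.List.pyGet?_natCast, List.getElem?_map, hidx2, Option.map_some]
    have hslice : PySem.List.slice ko (some (((m : Nat) : Int) + 1)) (some (((E : Nat) : Int) + 1))
        = (ko.drop (m+1)).take (e+1) := by
      have h3 : ((m : Nat) : Int) + 1 = (((m + 1 : Nat)) : Int) := by push_cast; ring
      have h4 : ((E : Nat) : Int) + 1 = (((E + 1 : Nat)) : Int) := by push_cast; ring
      rw [h3, h4, PySem.List.slice_natCast]
      congr 1
      omega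
    rw [hcol, if_neg (by simpa using hz), hget2]
    dsimp only
    rw [hslice]
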